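-- pv_equiv track=rewrite | github.com/MeKhani/modelGraph | tool.py | create_entity_type_triple
-- ===== SOURCE A (Python) =====
-- def create_entity_type_triple(outer_sent_relations_for_every_type,outer_recived_relations_for_every_type):
--      entity_type_triples = []
--      for obj , relations in outer_sent_relations_for_every_type.items():
--           for rel in relations:
--                subj_ent_types = [en_type for en_type, val in outer_recived_relations_for_every_type.items() if rel in val  ]
--                for subj  in subj_ent_types:
--                     entity_type_triples.append((obj,rel,subj))
--
--
--
--      return entity_type_triples
-- ===== SOURCE B (Python) =====
-- def create_entity_type_triple(outer_sent_relations_for_every_type, outer_recived_relations_for_every_type):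
--     # Inverted index: relation -> list of receiving entity types (in dict order)
--     index = {}
--     for en_type, val in outer_recived_relations_for_every_type.items():
--         for rel in dict.fromkeys(val):
--             index.setdefault(rel, []).append(en_type)
--     entity_type_triples = []
--     for obj, relations in outer_sent_relations_for_every_type.items():
--         for rel in relations:
--             for subj in index.get(rel, []):
--                 entity_type_triples.append((obj, rel, subj))
--     return entity_type_triples
-- ===== Notes on version B (the rewrite author's own statement) =====
-- stated objective: faster
-- what changed: B precomputes an inverted index relation->list of receiving entity types in one pass over the received dict, replacing A's rescanning of the whole received dict for every relation occurrence.
import Mathlib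
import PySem

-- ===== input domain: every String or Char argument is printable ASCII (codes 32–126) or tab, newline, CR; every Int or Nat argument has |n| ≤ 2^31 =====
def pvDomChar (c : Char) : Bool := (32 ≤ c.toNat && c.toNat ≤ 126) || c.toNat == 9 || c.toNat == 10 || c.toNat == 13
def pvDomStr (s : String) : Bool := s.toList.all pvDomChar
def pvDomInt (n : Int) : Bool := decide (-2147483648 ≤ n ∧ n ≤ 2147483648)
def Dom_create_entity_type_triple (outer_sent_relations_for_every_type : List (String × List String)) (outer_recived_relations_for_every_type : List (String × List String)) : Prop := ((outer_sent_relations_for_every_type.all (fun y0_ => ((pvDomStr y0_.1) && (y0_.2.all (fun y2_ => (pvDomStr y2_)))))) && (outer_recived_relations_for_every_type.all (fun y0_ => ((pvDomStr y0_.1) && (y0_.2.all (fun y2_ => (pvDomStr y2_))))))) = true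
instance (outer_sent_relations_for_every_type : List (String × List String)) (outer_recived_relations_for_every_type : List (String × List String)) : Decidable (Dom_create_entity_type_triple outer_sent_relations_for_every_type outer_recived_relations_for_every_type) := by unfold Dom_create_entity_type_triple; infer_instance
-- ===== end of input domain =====

-- B builds an inverted index relation -> receiving types once, instead of A's rescan of the
-- received dict for every relation occurrence (objective: faster, asymptotic).

-- ===== PORT A =====
def create_entity_type_triple (outer_sent_relations_for_every_type : List (String × List String)) (outer_recived_relations_for_every_type : List (String × List String)) : List (String × String × String) :=
  outer_sent_relations_for_every_type.foldl (fun acc p =>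
    p.2.foldl (fun acc rel =>
      let subj_ent_types :=
        (outer_recived_relations_for_every_type.filter (fun q => q.2.contains rel)).map (fun q => q.1)
      subj_ent_types.foldl (fun acc subj => acc ++ [(p.1, rel, subj)]) acc) acc) []

-- ===== PORT B =====
def create_entity_type_triple_alt (outer_sent_relations_for_every_type : List (String × List String)) (outer_recived_relations_for_every_type : List (String × List String)) : List (String × String × String) :=
  let index : PySem.Dict String (List String) :=
    outer_recived_relations_for_every_type.foldl (fun d p =>
      (PySem.List.dedup p.2).foldl (fun d rel => d.modify rel [] (· ++ [p.1])) d) PySem.Dict.empty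
  outer_sent_relations_for_every_type.foldl (fun acc p =>
    p.2.foldl (fun acc rel =>
      (index.getD rel []).foldl (fun acc subj => acc ++ [(p.1, rel, subj)]) acc) acc) []

-- ===== PRECONDITION & SPEC =====
def Spec_create_entity_type_triple (outer_sent_relations_for_every_type : List (String × List String)) (outer_recived_relations_for_every_type : List (String × List String)) (out : List (String × String × String)) : Prop := out = create_entity_type_triple_alt outer_sent_relations_for_every_type outer_recived_relations_for_every_type
instance (outer_sent_relations_for_every_type : List (String × List String)) (outer_recived_relations_for_every_type : List (String × List String)) (out : List (String × String × String)) : Decidable (Spec_create_entity_type_triple outer_sent_relations_for_every_type outer_recived_relations_for_every_type out) := by unfold Spec_create_entity_type_triple; infer_instance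

-- ===== CLAIM (what is proved, stated in full; the proofs are below) =====
def Claim_equal_create_entity_type_triple : Prop := ∀ (outer_sent_relations_for_every_type : List (String × List String)) (outer_recived_relations_for_every_type : List (String × List String)), Dom_create_entity_type_triple outer_sent_relations_for_every_type outer_recived_relations_for_every_type → Spec_create_entity_type_triple outer_sent_relations_for_every_type outer_recived_relations_for_every_type (create_entity_type_triple outer_sent_relations_for_every_type outer_recived_relations_for_every_type)

-- ===== LEMMAS AND PROOFS =====

-- filtering a Nodup list for one element yields at most that element
theorem filter_beq_of_nodup {α : Type} [BEq α] [LawfulBEq α] (l : List α) (c : α) (h : l.Nodup) :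
    l.filter (fun x => x == c) = if l.contains c then [c] else [] := by
  induction l with
  | nil => rfl
  | cons x t ih =>
    rw [List.nodup_cons] at h
    by_cases hx : x = c
    · subst hx
      have ht : t.filter (fun y => y == x) = [] := by
        apply List.filter_eq_nil_iff.mpr
        intro y hy hb
        exact h.1 ((by simpa using hb : y = x) ▸ hy)
      simp [ht]
    · simp [hx, ih h.2, Ne.symm hx]

-- the nested index-building loop is a flat loop over (rel, type) pairs
theorem index_fold_flat (l : List (String × List String)) (d : PySem.Dict String (List String)) :
    l.foldl (fun d p => (PySem.List.dedup p.2).foldl (fun d rel => d.modify rel [] (· ++ [p.1])) d) d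
      = (l.flatMap (fun p => (PySem.List.dedup p.2).map (fun rel => (rel, p.1)))).foldl
          (fun d q => d.modify q.1 [] (· ++ [q.2])) d := by
  induction l generalizing d with
  | nil => rfl
  | cons p t ih =>
    rw [List.foldl_cons, List.flatMap_cons, List.foldl_append, List.foldl_map, ih]

-- filtering the flat pair list for one relation gives A's scan of the received dict
theorem flat_filter (t : List (String × List String)) (c : String) :
    ((t.flatMap (fun p => (PySem.List.dedup p.2).map (fun rel => (rel, p.1)))).filter
        (fun q => q.1 == c)).map (fun q => q.2)
      = (t.filter (fun q => q.2.contains c)).map (fun q => q.1) := by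
  induction t with
  | nil => rfl
  | cons p t ih =>
    rw [List.flatMap_cons, List.filter_append, List.map_append, ih, List.filter_cons]
    have hcomp : ((fun q : String × String => q.1 == c) ∘ fun rel => (rel, p.1)) = fun rel => rel == c := by
      funext rel; rfl
    have hhead : (((PySem.List.dedup p.2).map (fun rel => (rel, p.1))).filter (fun q => q.1 == c)).map
        (fun q : String × String => q.2) = if p.2.contains c then [p.1] else [] := by
      rw [List.filter_map, hcomp, filter_beq_of_nodup _ _ (PySem.List.nodup_dedup p.2)]
      by_cases hc : p.2.contains c = true
      · have hd : (PySem.List.dedup p.2).contains c = true := by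
          rw [List.contains_iff_mem, PySem.List.mem_dedup]
          exact List.contains_iff_mem.mp hc
        rw [if_pos hd, if_pos hc]; rfl
      · have hd : ¬ ((PySem.List.dedup p.2).contains c = true) := by
          rw [List.contains_iff_mem, PySem.List.mem_dedup]
          exact fun hm => hc (List.contains_iff_mem.mpr hm)
        rw [if_neg hd, if_neg hc]; rfl
    rw [hhead]
    by_cases hc : c ∈ p.2
    · simp [hc]
    · simp [hc]

-- the index lookup equals A's comprehension over the received dict
theorem index_getD (r : List (String × List String)) (c : String) :
    (r.foldl (fun d p => (PySem.List.dedup p.2).foldl (fun d rel => d.modify rel [] (· ++ [p.1])) d)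
        PySem.Dict.empty).getD c []
      = (r.filter (fun q => q.2.contains c)).map (fun q => q.1) := by
  rw [index_fold_flat, PySem.Dict.getD_foldl_modify_append, flat_filter]
  rfl

-- ===== VERDICT (by name: the statement is the Claim_ definition above) =====
theorem create_entity_type_triple_spec : Claim_equal_create_entity_type_triple := by
  intro s r _
  unfold Spec_create_entity_type_triple create_entity_type_triple create_entity_type_triple_alt
  simp only [index_getD]
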